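-- pv_equiv track=rewrite | github.com/DragunWF/Competitive-Programming | CodeWars/python/6_kyu/complete_the_pattern_14.py | generate_x_pattern
-- ===== SOURCE A (Python) =====
-- def generate_x_pattern(n: int) -> list[str]:
--     lines = []
--     middle_whitespace_count = n * 2 - 3
--     edge_whitespace_count = 0
--     for i in range(1, n + 1):
--         num = i % 10
--         edges = " " * edge_whitespace_count
--         if i != n:
--             middle = " " * middle_whitespace_count
--             lines.append(f"{edges}{num}{middle}{num}{edges}")
--             middle_whitespace_count -= 2
--             edge_whitespace_count += 1
--         else:
--             lines.append(f"{edges}{num}{edges}")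
--     for i in range(n - 1, 0, -1):
--         middle_whitespace_count += 2
--         edge_whitespace_count -= 1
--         num = i % 10
--         edges = " " * edge_whitespace_count
--         middle = " " * middle_whitespace_count
--         lines.append(f"{edges}{num}{middle}{num}{edges}")
--     return lines
-- ===== SOURCE B (Python) =====
-- def generate_x_pattern(n: int) -> list[str]:
--     size = 2 * n - 1
--     blank = b" " * size
--     rows = []
--     for r in range(size):
--         d = min(r, size - 1 - r)
--         canvas = bytearray(blank)
--         canvas[d] = ord(str((d + 1) % 10))
--         canvas[size - 1 - d] = canvas[d]
--         rows.append(canvas.decode("ascii"))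
--     return rows
-- ===== Notes on version B (the rewrite author's own statement) =====
-- stated objective: alternative
-- what changed: B draws the X by coordinate placement on a grid: one loop over all 2n-1 row indices computes d = min(r, size-1-r), copies a precomputed blank bytearray row, writes the digit byte at positions d and size-1-d by index assignment and decodes it; A assembles each line from two decrementing/incrementing whitespace counters across two sequential loops with no grid.
import Mathlib
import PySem

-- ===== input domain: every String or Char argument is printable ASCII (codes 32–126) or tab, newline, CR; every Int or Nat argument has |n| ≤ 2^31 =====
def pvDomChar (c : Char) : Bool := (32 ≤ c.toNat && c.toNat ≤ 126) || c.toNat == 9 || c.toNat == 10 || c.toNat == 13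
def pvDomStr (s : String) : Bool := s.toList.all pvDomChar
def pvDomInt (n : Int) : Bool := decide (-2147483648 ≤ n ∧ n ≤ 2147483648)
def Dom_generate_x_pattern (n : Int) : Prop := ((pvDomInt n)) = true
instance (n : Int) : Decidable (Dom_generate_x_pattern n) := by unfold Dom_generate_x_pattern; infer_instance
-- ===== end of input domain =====

-- B draws the X by coordinate placement: for each row index r it writes the digit into
-- positions d and size-1-d of a blank canvas row and joins it; A assembles each line from
-- two running whitespace counters across two sequential loops.

-- ===== PORT A =====
-- the body of A's first loop ('if i != n' branch appends a two-digit line and updates the counters)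
def pvStep1 (n : Int) (st : List String × Int × Int) (i : Int) : List String × Int × Int :=
  let lines := st.1
  let mw := st.2.1
  let ew := st.2.2
  let num := PySem.Int.mod i 10
  let edges := List.replicate ew.toNat ' '
  if i ≠ n then
    let middle := List.replicate mw.toNat ' '
    (lines ++ [String.ofList (edges ++ PySem.Int.toChars num ++ middle ++ PySem.Int.toChars num ++ edges)],
     mw - 2, ew + 1)
  else
    (lines ++ [String.ofList (edges ++ PySem.Int.toChars num ++ edges)], mw, ew)

-- the body of A's second loop (counters updated first, then the line is appended)
def pvStep2 (st : List String × Int × Int) (i : Int) : List String × Int × Int :=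
  let lines := st.1
  let mw := st.2.1 + 2
  let ew := st.2.2 - 1
  let num := PySem.Int.mod i 10
  let edges := List.replicate ew.toNat ' '
  let middle := List.replicate mw.toNat ' '
  (lines ++ [String.ofList (edges ++ PySem.Int.toChars num ++ middle ++ PySem.Int.toChars num ++ edges)],
   mw, ew)

-- literal port of A: two folds threading (lines, middle_whitespace_count, edge_whitespace_count)
def generate_x_pattern (n : Int) : List String :=
  let s1 := (PySem.List.pyRange 1 (n + 1) 1).foldl (pvStep1 n) ([], n * 2 - 3, 0)
  let s2 := (PySem.List.pyRange (n - 1) 0 (-1)).foldl pvStep2 s1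
  s2.1

-- ===== PORT B =====
-- the body of B's loop: copy the blank canvas row, write the digit byte at indices d and
-- size-1-d (both nonnegative and in range for every r the loop produces, so List.set with
-- .toNat is exact for Python's bytearray index assignment), then decode the row.
-- ord(str((d+1)%10)) is the single digit character, ported as (toChars …).headD ' '
-- (exact since 0 ≤ (d+1)%10 ≤ 9, a one-character string); canvas[size-1-d] = canvas[d]
-- reads back exactly the byte just written, i.e. the same character.
def pvCanvasRow (size r : Int) : String :=
  let d := min r (size - 1 - r)
  let digit := (PySem.Int.toChars (PySem.Int.mod (d + 1) 10)).headD ' '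
  let canvas := ((List.replicate size.toNat (' ' : Char)).set d.toNat digit).set
      (size - 1 - d).toNat digit
  String.ofList canvas

-- literal port of B: a single loop over all row indices 0 .. size-1, appending each canvas
-- row (the precomputed blank template is re-created inside pvCanvasRow, the same value)
def generate_x_pattern_alt (n : Int) : List String :=
  let size := 2 * n - 1
  (PySem.List.pyRange 0 size 1).foldl (fun rows r => rows ++ [pvCanvasRow size r]) []

-- ===== PRECONDITION & SPEC =====
def Spec_generate_x_pattern (n : Int) (out : List String) : Prop := out = generate_x_pattern_alt n
instance (n : Int) (out : List String) : Decidable (Spec_generate_x_pattern n out) := by unfold Spec_generate_x_pattern; infer_instance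

-- ===== CLAIM (what is proved, stated in full; the proofs are below) =====
def Claim_equal_generate_x_pattern : Prop := ∀ (n : Int), Dom_generate_x_pattern n → Spec_generate_x_pattern n (generate_x_pattern n)

-- ===== LEMMAS AND PROOFS =====

-- the common shape of every non-central line (meaningful for 1 ≤ i ≤ n-1)
def pvRow (n i : Int) : List Char :=
  List.replicate (i - 1).toNat ' ' ++ PySem.Int.toChars (PySem.Int.mod i 10) ++
  List.replicate (2 * n - 1 - 2 * i).toNat ' ' ++ PySem.Int.toChars (PySem.Int.mod i 10) ++
  List.replicate (i - 1).toNat ' '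

-- the central line
def pvCenter (n : Int) : List Char :=
  List.replicate (n - 1).toNat ' ' ++ PySem.Int.toChars (PySem.Int.mod n 10) ++
  List.replicate (n - 1).toNat ' '

-- A's first loop, up to (but excluding) i = n
theorem pv_loopA1 (n : Int) : ∀ (k : Nat) (a mw ew : Int) (lines : List String),
    a + k = n → 1 ≤ a → mw = 2 * n - 1 - 2 * a → ew = a - 1 →
    (PySem.List.pyRange a n 1).foldl (pvStep1 n) (lines, mw, ew)
    = (lines ++ (PySem.List.pyRange a n 1).map (fun i => String.ofList (pvRow n i)), -1, n - 1) := by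
  intro k
  induction k with
  | zero =>
    intro a mw ew lines ha h1 hmw hew
    rw [PySem.List.pyRange_one_eq_nil (by omega)]
    simp only [List.foldl_nil, List.map_nil, List.append_nil]
    refine Prod.ext rfl (Prod.ext ?_ ?_) <;> simp <;> omega
  | succ k ih =>
    intro a mw ew lines ha h1 hmw hew
    rw [PySem.List.pyRange_one_cons (by omega : a < n)]
    simp only [List.foldl_cons]
    have hstep : pvStep1 n (lines, mw, ew) a
        = (lines ++ [String.ofList (pvRow n a)], 2 * n - 1 - 2 * (a + 1), (a + 1) - 1) := by
      simp only [pvStep1, pvRow]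
      rw [if_pos (by omega : a ≠ n)]
      subst hmw hew
      simp only [Prod.mk.injEq]
      refine ⟨trivial, by omega, by omega⟩
    rw [hstep, ih (a + 1) _ _ _ (by omega) (by omega) rfl rfl]
    simp [List.append_assoc]

-- A's second loop
theorem pv_loopA2 (n : Int) : ∀ (k : Nat) (b mw : Int) (lines : List String),
    (b : Int) = k → b ≤ n - 1 → mw = 2 * n - 3 - 2 * b →
    (PySem.List.pyRange b 0 (-1)).foldl pvStep2 (lines, mw, b)
    = (lines ++ (PySem.List.pyRange b 0 (-1)).map (fun i => String.ofList (pvRow n i)), 2 * n - 3, 0) := by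
  intro k
  induction k with
  | zero =>
    intro b mw lines hb hbn hmw
    rw [PySem.List.pyRange_neg_one_eq_nil (by omega)]
    simp only [List.foldl_nil, List.map_nil, List.append_nil]
    refine Prod.ext rfl (Prod.ext ?_ ?_) <;> simp <;> omega
  | succ k ih =>
    intro b mw lines hb hbn hmw
    rw [PySem.List.pyRange_neg_one_cons (by omega : (0:Int) < b)]
    simp only [List.foldl_cons]
    have hstep : pvStep2 (lines, mw, b) b
        = (lines ++ [String.ofList (pvRow n b)], 2 * n - 3 - 2 * (b - 1), b - 1) := by
      simp only [pvStep2, pvRow]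
      subst hmw
      rw [show (2 * n - 3 - 2 * b + 2 : Int) = 2 * n - 1 - 2 * b by ring]
      simp only [Prod.mk.injEq]
      refine ⟨trivial, by omega, trivial⟩
    rw [hstep, ih (b - 1) _ _ (by omega) (by omega) rfl]
    simp [List.append_assoc]

-- A's output in closed form: left wing, centre, right wing
theorem pvA_closed (n : Int) (hn : 1 ≤ n) :
    generate_x_pattern n
      = (PySem.List.pyRange 1 n 1).map (fun i => String.ofList (pvRow n i)) ++ [String.ofList (pvCenter n)]
        ++ (PySem.List.pyRange (n - 1) 0 (-1)).map (fun i => String.ofList (pvRow n i)) := by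
  unfold generate_x_pattern
  rw [PySem.List.pyRange_one_append 1 n (n + 1) (by omega) (by omega),
    PySem.List.pyRange_one_singleton, List.foldl_append,
    pv_loopA1 n (n - 1).toNat 1 (n * 2 - 3) 0 [] (by omega) (by omega) (by ring) (by ring)]
  simp only [List.foldl_cons, List.foldl_nil]
  have hstepn : pvStep1 n ([] ++ (PySem.List.pyRange 1 n 1).map (fun i => String.ofList (pvRow n i)), -1, n - 1) n
      = ([] ++ (PySem.List.pyRange 1 n 1).map (fun i => String.ofList (pvRow n i)) ++ [String.ofList (pvCenter n)], -1, n - 1) := by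
    simp only [pvStep1, pvCenter]
    rw [if_neg (by omega : ¬ n ≠ n)]
  rw [hstepn, pv_loopA2 n (n - 1).toNat (n - 1) (-1) _ (by omega) (by omega) (by ring)]
  simp [List.append_assoc]

-- str(m) for a single digit m is one character
theorem pv_toChars_digit (m : Int) (h0 : 0 ≤ m) (h9 : m < 10) :
    PySem.Int.toChars m = [(PySem.Int.toChars m).headD ' '] := by
  interval_cases m <;> rfl

-- 0 ≤ a % 10 < 10
theorem pv_mod_ten_bounds (a : Int) : 0 ≤ PySem.Int.mod a 10 ∧ PySem.Int.mod a 10 < 10 := by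
  rw [PySem.Int.mod_eq_emod_of_pos (by norm_num : (0:Int) < 10)]
  omega

-- setting one cell of a blank canvas row
theorem pv_set_rep {α : Type} : ∀ (a m : Nat) (x c : α), a < m →
    (List.replicate m x).set a c = List.replicate a x ++ c :: List.replicate (m - a - 1) x := by
  intro a
  induction a with
  | zero =>
    intro m x c hm
    cases m with
    | zero => omega
    | succ m => simp [List.replicate_succ]
  | succ a ih =>
    intro m x c hm
    cases m with
    | zero => omega
    | succ m =>
      have h1 : m + 1 - (a + 1) - 1 = m - a - 1 := by omega
      simp only [List.replicate_succ, List.set_cons_succ, ih m x c (by omega),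
        List.cons_append, h1]

-- setting two distinct cells of a blank canvas row
theorem pv_set2_lt {α : Type} (m a b : Nat) (x c : α) (hab : a < b) (hb : b < m) :
    ((List.replicate m x).set a c).set b c
      = List.replicate a x ++ c :: (List.replicate (b - a - 1) x ++ c :: List.replicate (m - 1 - b) x) := by
  rw [pv_set_rep a m x c (by omega)]
  obtain ⟨k, hk⟩ : ∃ k, b = a + 1 + k := ⟨b - a - 1, by omega⟩
  subst hk
  rw [List.set_append_right _ _ (by simp; omega)]
  simp only [List.length_replicate]
  have h1 : a + 1 + k - a = k + 1 := by omega
  have h2 : a + 1 + k - a - 1 = k := by omega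
  have h3 : m - 1 - (a + 1 + k) = m - a - 1 - k - 1 := by omega
  rw [h1, List.set_cons_succ, pv_set_rep k (m - a - 1) x c (by omega), h3,
    Nat.add_sub_cancel]

-- setting the same cell twice (the central row)
theorem pv_set2_eq {α : Type} (m a : Nat) (x c : α) (ha : a < m) :
    ((List.replicate m x).set a c).set a c
      = List.replicate a x ++ c :: List.replicate (m - a - 1) x := by
  rw [pv_set_rep a m x c ha, List.set_append_right _ _ (by simp),
    List.length_replicate, Nat.sub_self, List.set_cons_zero]

-- pvCanvasRow with its let-bindings unfolded (definitional)
theorem pvCanvasRow_def (size r : Int) :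
    pvCanvasRow size r
      = String.ofList (((List.replicate size.toNat (' ' : Char)).set
          (min r (size - 1 - r)).toNat
          ((PySem.Int.toChars (PySem.Int.mod (min r (size - 1 - r) + 1) 10)).headD ' ')).set
          (size - 1 - min r (size - 1 - r)).toNat
          ((PySem.Int.toChars (PySem.Int.mod (min r (size - 1 - r) + 1) 10)).headD ' ')) := rfl

-- B's canvas row for a wing index: d ≤ n-2 places the digit twice and gives pvRow n (d+1)
theorem pvB_wing (n r d : Int) (hn : 1 ≤ n) (hmin : min r (2 * n - 1 - 1 - r) = d)
    (hd0 : 0 ≤ d) (hdn : d ≤ n - 2) :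
    pvCanvasRow (2 * n - 1) r = String.ofList (pvRow n (d + 1)) := by
  rw [pvCanvasRow_def, hmin]
  unfold pvRow
  have hlt : d.toNat < (2 * n - 1 - 1 - d).toNat := by omega
  have hbm : (2 * n - 1 - 1 - d).toNat < (2 * n - 1).toNat := by omega
  obtain ⟨hm0, hm9⟩ := pv_mod_ten_bounds (d + 1)
  rw [pv_set2_lt _ _ _ _ _ hlt hbm,
    show (2 * n - 1 - 1 - d).toNat - d.toNat - 1 = (2 * n - 1 - 2 * (d + 1)).toNat by omega,
    show (2 * n - 1).toNat - 1 - (2 * n - 1 - 1 - d).toNat = (d + 1 - 1).toNat by omega,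
    show d.toNat = (d + 1 - 1).toNat by omega,
    pv_toChars_digit (PySem.Int.mod (d + 1) 10) hm0 hm9]
  simp [List.append_assoc]

-- B's canvas row at the centre: the two assignments hit the same cell, giving pvCenter n
theorem pvB_mid (n : Int) (hn : 1 ≤ n) :
    pvCanvasRow (2 * n - 1) (n - 1) = String.ofList (pvCenter n) := by
  rw [pvCanvasRow_def]
  unfold pvCenter
  have hmin : min (n - 1) (2 * n - 1 - 1 - (n - 1)) = n - 1 := by omega
  obtain ⟨hm0, hm9⟩ := pv_mod_ten_bounds n
  rw [hmin, show (n - 1 + 1 : Int) = n by ring,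
    show (2 * n - 1 - 1 - (n - 1)).toNat = (n - 1).toNat by omega,
    pv_set2_eq _ _ _ _ (by omega : (n - 1).toNat < (2 * n - 1).toNat),
    show (2 * n - 1).toNat - (n - 1).toNat - 1 = (n - 1).toNat by omega,
    pv_toChars_digit (PySem.Int.mod n 10) hm0 hm9]
  simp [List.append_assoc]

-- B's output in the same closed form
theorem pvB_closed (n : Int) (hn : 1 ≤ n) :
    generate_x_pattern_alt n
      = (PySem.List.pyRange 1 n 1).map (fun i => String.ofList (pvRow n i)) ++ [String.ofList (pvCenter n)]
        ++ (PySem.List.pyRange (n - 1) 0 (-1)).map (fun i => String.ofList (pvRow n i)) := by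
  unfold generate_x_pattern_alt
  rw [PySem.List.foldl_append_singleton_eq_map, List.nil_append,
    PySem.List.pyRange_one 0 (2 * n - 1), List.map_map]
  set a := (n - 1).toNat with ha
  have hsz : (2 * n - 1 - 0).toNat = a + (1 + a) := by omega
  rw [hsz, List.range_add, List.range_add, List.range_one]
  simp only [List.map_append, List.map_map, List.map_cons, List.map_nil]
  have hleft : List.map (pvCanvasRow (2 * n - 1) ∘ fun k : Nat => 0 + (k : Int)) (List.range a)
      = List.map (fun i => String.ofList (pvRow n i)) (PySem.List.pyRange 1 n 1) := by
    rw [PySem.List.pyRange_one 1 n, List.map_map, ← ha]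
    refine List.map_congr_left ?_
    intro k hk
    have hk' : (k : Int) ≤ n - 2 := by have := List.mem_range.mp hk; omega
    simp only [Function.comp]
    rw [show (1 + (k : Int)) = (k : Int) + 1 by ring]
    exact pvB_wing n (0 + (k : Int)) (k : Int) hn (by omega) (by omega) hk'
  have hmid : (pvCanvasRow (2 * n - 1) ∘ fun k : Nat => 0 + (k : Int)) (a + 0)
      = String.ofList (pvCenter n) := by
    simp only [Function.comp]
    have harg : ((0 : Int) + ((a + 0 : Nat) : Int)) = n - 1 := by omega
    rw [harg]
    exact pvB_mid n hn
  have hright : List.map ((pvCanvasRow (2 * n - 1) ∘ fun k : Nat => 0 + (k : Int)) ∘ (fun x => a + x) ∘ fun x => 1 + x) (List.range a)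
      = List.map (fun i => String.ofList (pvRow n i)) (PySem.List.pyRange (n - 1) 0 (-1)) := by
    rw [PySem.List.pyRange_neg_one_eq_reverse, show ((0 : Int) + 1) = 1 by ring,
      show ((n : Int) - 1 + 1) = n by ring, PySem.List.pyRange_one 1 n, ← ha,
      ← List.map_reverse, List.range_eq_range', List.reverse_range', ← List.range_eq_range',
      List.map_map, List.map_map]
    refine List.map_congr_left ?_
    intro k hk
    have hk' : k < a := List.mem_range.mp hk
    simp only [Function.comp]
    rw [pvB_wing n (0 + ((a + (1 + k) : Nat) : Int)) (n - 2 - (k : Int)) hn (by omega) (by omega) (by omega)]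
    congr 2
    omega
  rw [hleft, hmid, hright]
  simp [List.append_assoc]

-- ===== VERDICT (by name: the statement is the Claim_ definition above) =====
theorem generate_x_pattern_spec : Claim_equal_generate_x_pattern := by
  intro n _
  unfold Spec_generate_x_pattern
  by_cases hn : 1 ≤ n
  · rw [pvA_closed n hn, pvB_closed n hn]
  · have h0 : n ≤ 0 := by omega
    simp [generate_x_pattern, generate_x_pattern_alt,
      PySem.List.pyRange_one_eq_nil (by omega : n + 1 ≤ 1),
      PySem.List.pyRange_one_eq_nil (by omega : 2 * n - 1 ≤ 0),
      PySem.List.pyRange_neg_one_eq_nil (by omega : n - 1 ≤ 0)]
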